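-- pv_equiv track=rewrite | github.com/philz0918/Accident_prediction_LSTM | Src/4-Exploratory_Data_Analysis.py | freq_of_day
-- ===== SOURCE A (Python) =====
-- def freq_of_day(token_sentence) :
--     #frequency of five keywords
--
--     cnt_mon =0
--     cnt_tue =0
--     cnt_wed =0
--     cnt_thr = 0
--     cnt_fri = 0
--     cnt_sat = 0
--     cnt_sun = 0
--
--     for token in token_sentence :
--         if 'monday' in token :
--             cnt_mon +=1
--         if 'tuesday' in token :
--             cnt_tue +=1
--         if 'wednesday' in token :
--             cnt_wed +=1
--         if 'thursday' in token :
--             cnt_thr +=1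
--         if 'friday' in token :
--             cnt_fri +=1
--         if 'saturday' in token :
--             cnt_sat +=1
--         if 'sunday' in token :
--             cnt_sun +=1
--
--
--     freq_day_dict = {}
--     freq_day_dict['Mon'] = cnt_mon
--     freq_day_dict['Tue'] = cnt_tue
--     freq_day_dict['Wed'] = cnt_wed
--     freq_day_dict['Thu'] = cnt_thr
--     freq_day_dict['Fri'] = cnt_fri
--     freq_day_dict['Sat'] = cnt_sat
--     freq_day_dict['Sun'] = cnt_sun
--
--     return freq_day_dict
-- ===== SOURCE B (Python) =====
-- def freq_of_day(token_sentence):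
--     # idiomatic: loop over the seven (label, keyword) pairs, one counting pass per day
--     tokens = list(token_sentence)
--     days = [("Mon", "monday"), ("Tue", "tuesday"), ("Wed", "wednesday"),
--             ("Thu", "thursday"), ("Fri", "friday"), ("Sat", "saturday"), ("Sun", "sunday")]
--     return {label: sum(1 for token in tokens if kw in token) for label, kw in days}
-- ===== Notes on version B (the rewrite author's own statement) =====
-- stated objective: idiomatic
-- what changed: Replaced the single pass maintaining seven named counters by a dict comprehension over a (label, keyword) table, one counting pass (sum of a filtered generator) per weekday.
import Mathlib
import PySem

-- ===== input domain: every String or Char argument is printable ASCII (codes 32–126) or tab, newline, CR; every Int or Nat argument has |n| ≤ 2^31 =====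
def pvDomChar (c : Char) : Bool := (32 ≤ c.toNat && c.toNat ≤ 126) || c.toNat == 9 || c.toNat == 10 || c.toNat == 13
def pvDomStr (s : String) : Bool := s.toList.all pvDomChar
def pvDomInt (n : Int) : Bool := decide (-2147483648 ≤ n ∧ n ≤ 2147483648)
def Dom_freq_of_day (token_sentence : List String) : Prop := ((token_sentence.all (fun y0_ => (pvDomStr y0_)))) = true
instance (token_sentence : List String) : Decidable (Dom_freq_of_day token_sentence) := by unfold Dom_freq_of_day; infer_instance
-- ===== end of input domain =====

-- B replaces A's single pass with seven named counters by a table of (label, keyword)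
-- pairs and one counting pass per weekday (return value only; no side effects involved).
-- ===== PORT A =====
def freq_of_day (token_sentence : List String) : List (String × Int) :=
  let s := token_sentence.foldl
    (fun s token =>
      ((if PySem.Str.isIn "monday" token then s.1 + 1 else s.1),
       (if PySem.Str.isIn "tuesday" token then s.2.1 + 1 else s.2.1),
       (if PySem.Str.isIn "wednesday" token then s.2.2.1 + 1 else s.2.2.1),
       (if PySem.Str.isIn "thursday" token then s.2.2.2.1 + 1 else s.2.2.2.1),
       (if PySem.Str.isIn "friday" token then s.2.2.2.2.1 + 1 else s.2.2.2.2.1),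
       (if PySem.Str.isIn "saturday" token then s.2.2.2.2.2.1 + 1 else s.2.2.2.2.2.1),
       (if PySem.Str.isIn "sunday" token then s.2.2.2.2.2.2 + 1 else s.2.2.2.2.2.2)))
    ((0 : Int), (0 : Int), (0 : Int), (0 : Int), (0 : Int), (0 : Int), (0 : Int))
  [("Mon", s.1), ("Tue", s.2.1), ("Wed", s.2.2.1), ("Thu", s.2.2.2.1),
   ("Fri", s.2.2.2.2.1), ("Sat", s.2.2.2.2.2.1), ("Sun", s.2.2.2.2.2.2)]

-- ===== PORT B =====
def freq_of_day_alt (token_sentence : List String) : List (String × Int) :=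
  let days : List (String × String) :=
    [("Mon", "monday"), ("Tue", "tuesday"), ("Wed", "wednesday"), ("Thu", "thursday"),
     ("Fri", "friday"), ("Sat", "saturday"), ("Sun", "sunday")]
  days.map (fun d =>
    (d.1, ((token_sentence.filter (fun token => PySem.Str.isIn d.2 token)).map
            (fun _ => (1 : Int))).sum))

-- ===== PRECONDITION & SPEC =====
def Spec_freq_of_day (token_sentence : List String) (out : List (String × Int)) : Prop := out = freq_of_day_alt token_sentence
instance (token_sentence : List String) (out : List (String × Int)) : Decidable (Spec_freq_of_day token_sentence out) := by unfold Spec_freq_of_day; infer_instance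

-- ===== CLAIM (what is proved, stated in full; the proofs are below) =====
def Claim_equal_freq_of_day : Prop := ∀ (token_sentence : List String), Dom_freq_of_day token_sentence → Spec_freq_of_day token_sentence (freq_of_day token_sentence)

-- ===== LEMMAS AND PROOFS =====

-- sum of 1 over the tokens passing the test equals the countP the counters compute
theorem sum_ones_eq_countP (l : List String) (p : String → Bool) :
    ((l.filter p).map (fun _ => (1 : Int))).sum = (l.countP p : Int) := by
  rw [List.countP_eq_length_filter]
  generalize l.filter p = m
  induction m with
  | nil => simp
  | cons h t ih =>
    simp only [List.map_cons, List.sum_cons, List.length_cons, ih]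
    omega

-- closed form of A's seven-counter loop: each counter adds the count of its keyword
theorem loopA_closed (l : List String) (a b c d e f g : Int) :
    l.foldl
      (fun s token =>
        ((if PySem.Str.isIn "monday" token then s.1 + 1 else s.1),
         (if PySem.Str.isIn "tuesday" token then s.2.1 + 1 else s.2.1),
         (if PySem.Str.isIn "wednesday" token then s.2.2.1 + 1 else s.2.2.1),
         (if PySem.Str.isIn "thursday" token then s.2.2.2.1 + 1 else s.2.2.2.1),
         (if PySem.Str.isIn "friday" token then s.2.2.2.2.1 + 1 else s.2.2.2.2.1),
         (if PySem.Str.isIn "saturday" token then s.2.2.2.2.2.1 + 1 else s.2.2.2.2.2.1),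
         (if PySem.Str.isIn "sunday" token then s.2.2.2.2.2.2 + 1 else s.2.2.2.2.2.2)))
      (a, b, c, d, e, f, g) =
    (a + (l.countP (fun t => PySem.Str.isIn "monday" t) : Int),
     b + (l.countP (fun t => PySem.Str.isIn "tuesday" t) : Int),
     c + (l.countP (fun t => PySem.Str.isIn "wednesday" t) : Int),
     d + (l.countP (fun t => PySem.Str.isIn "thursday" t) : Int),
     e + (l.countP (fun t => PySem.Str.isIn "friday" t) : Int),
     f + (l.countP (fun t => PySem.Str.isIn "saturday" t) : Int),
     g + (l.countP (fun t => PySem.Str.isIn "sunday" t) : Int)) := by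
  induction l generalizing a b c d e f g with
  | nil => simp
  | cons h t ih =>
    simp only [List.foldl_cons, List.countP_cons, ih, Prod.mk.injEq]
    push_cast
    split_ifs <;> omega

-- ===== VERDICT (by name: the statement is the Claim_ definition above) =====
theorem freq_of_day_spec : Claim_equal_freq_of_day := by
  intro ts _
  unfold Spec_freq_of_day freq_of_day freq_of_day_alt
  rw [loopA_closed]
  simp only [List.map_cons, List.map_nil, sum_ones_eq_countP, zero_add]
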